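-- pv_equiv track=rewrite | github.com/montaser55/Smart-home | Assignment_4/task3/codes/a4task33.py | compute_stats_and_abs_cumulative_sums
-- ===== SOURCE A (Python) =====
-- def compute_stats_and_abs_cumulative_sums(flow_pairs):
--     incoming_packets = 0
--     outgoing_packets = 0
--     incoming_size_sum = 0
--     outgoing_size_sum = 0
--
--     cumulative_sums = []
--     running_sum = 0
--
--     for direction_str, size in flow_pairs:
--         direction = direction_str.lower().strip()
--
--         if direction in ['receive', 'incoming']:
--             incoming_packets += 1
--             incoming_size_sum += size
--         else:
--             outgoing_packets += 1
--             outgoing_size_sum += size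
--
--         running_sum += size
--         cumulative_sums.append(running_sum)
--
--     stats = {
--         'incoming_packets': incoming_packets,
--         'outgoing_packets': outgoing_packets,
--         'incoming_size_sum': incoming_size_sum,
--         'outgoing_size_sum': outgoing_size_sum
--     }
--     return stats, cumulative_sums
-- ===== SOURCE B (Python) =====
-- def _is_incoming(direction_str):
--     return direction_str.lower().strip() in ('receive', 'incoming')
--
--
-- def _running_sums(sizes):
--     out = []
--     total = 0
--     for s in sizes:
--         total += s
--         out.append(total)
--     return out
--
--
-- def compute_stats_and_abs_cumulative_sums(flow_pairs):
--     pairs = list(flow_pairs)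
--     sizes = [s for _, s in pairs]
--     incoming = [s for d, s in pairs if _is_incoming(d)]
--     total = sum(sizes)
--     inc_sum = sum(incoming)
--     stats = {
--         'incoming_packets': len(incoming),
--         'outgoing_packets': len(pairs) - len(incoming),
--         'incoming_size_sum': inc_sum,
--         'outgoing_size_sum': total - inc_sum,
--     }
--     return stats, _running_sums(sizes)
-- ===== Notes on version B (the rewrite author's own statement) =====
-- stated objective: idiomatic
-- what changed: Replaces A's single fused loop carrying six accumulators by separate passes: comprehensions/filter for the incoming group, sum() for totals (outgoing derived as complements), and a dedicated running-sum pass over the sizes list.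
import Mathlib
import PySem

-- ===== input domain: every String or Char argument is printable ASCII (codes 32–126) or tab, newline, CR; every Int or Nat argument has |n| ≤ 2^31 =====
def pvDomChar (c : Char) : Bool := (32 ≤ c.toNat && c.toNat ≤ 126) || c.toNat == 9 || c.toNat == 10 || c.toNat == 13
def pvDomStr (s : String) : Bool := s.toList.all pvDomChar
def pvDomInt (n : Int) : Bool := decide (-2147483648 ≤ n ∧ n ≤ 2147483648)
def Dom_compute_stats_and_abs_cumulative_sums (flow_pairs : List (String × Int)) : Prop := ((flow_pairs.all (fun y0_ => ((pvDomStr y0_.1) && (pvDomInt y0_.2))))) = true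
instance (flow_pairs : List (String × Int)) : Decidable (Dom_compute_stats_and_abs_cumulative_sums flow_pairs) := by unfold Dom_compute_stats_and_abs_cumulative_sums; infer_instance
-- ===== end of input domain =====

-- B replaces A's single fused six-accumulator loop by separate passes (filter + sums with
-- outgoing as complements, plus a dedicated running-sum pass); same cost, more idiomatic.


-- ===== PORT A =====
-- one loop iteration of A: classify, bump the four counters, extend the cumulative list
def stepA (acc : Int × Int × Int × Int × Int × List Int) (p : String × Int) :
    Int × Int × Int × Int × Int × List Int :=
  match acc with
  | (ip, op, isum, osum, run, cums) =>
    let direction := PySem.Str.strip (PySem.Str.lower p.1)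
    if direction == "receive" || direction == "incoming" then
      (ip + 1, op, isum + p.2, osum, run + p.2, cums ++ [run + p.2])
    else
      (ip, op + 1, isum, osum + p.2, run + p.2, cums ++ [run + p.2])

def compute_stats_and_abs_cumulative_sums (flow_pairs : List (String × Int)) :
    (List (String × Int)) × List Int :=
  let st := flow_pairs.foldl stepA (0, 0, 0, 0, 0, [])
  ([("incoming_packets", st.1), ("outgoing_packets", st.2.1),
    ("incoming_size_sum", st.2.2.1), ("outgoing_size_sum", st.2.2.2.1)],
   st.2.2.2.2.2)

-- ===== PORT B =====
def isIncomingB (d : String) : Bool :=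
  let dir := PySem.Str.strip (PySem.Str.lower d)
  dir == "receive" || dir == "incoming"

-- Source B's _running_sums: a dedicated running-sum pass over the sizes
def stepRun (acc : Int × List Int) (s : Int) : Int × List Int :=
  (acc.1 + s, acc.2 ++ [acc.1 + s])

def runningSums (sizes : List Int) : List Int :=
  (sizes.foldl stepRun (0, [])).2

def compute_stats_and_abs_cumulative_sums_alt (flow_pairs : List (String × Int)) :
    (List (String × Int)) × List Int :=
  let pairs := flow_pairs
  let sizes := pairs.map (fun p => p.2)
  let incoming := (pairs.filter (fun p => isIncomingB p.1)).map (fun p => p.2)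
  let total := sizes.sum
  let inc_sum := incoming.sum
  ([("incoming_packets", (incoming.length : Int)),
    ("outgoing_packets", (pairs.length : Int) - (incoming.length : Int)),
    ("incoming_size_sum", inc_sum),
    ("outgoing_size_sum", total - inc_sum)],
   runningSums sizes)

-- ===== PRECONDITION & SPEC =====
def Spec_compute_stats_and_abs_cumulative_sums (flow_pairs : List (String × Int)) (out : (List (String × Int)) × List Int) : Prop := out = compute_stats_and_abs_cumulative_sums_alt flow_pairs
instance (flow_pairs : List (String × Int)) (out : (List (String × Int)) × List Int) : Decidable (Spec_compute_stats_and_abs_cumulative_sums flow_pairs out) := by unfold Spec_compute_stats_and_abs_cumulative_sums; infer_instance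

-- ===== CLAIM (what is proved, stated in full; the proofs are below) =====
def Claim_equal_compute_stats_and_abs_cumulative_sums : Prop := ∀ (flow_pairs : List (String × Int)), Dom_compute_stats_and_abs_cumulative_sums flow_pairs → Spec_compute_stats_and_abs_cumulative_sums flow_pairs (compute_stats_and_abs_cumulative_sums flow_pairs)

-- ===== LEMMAS AND PROOFS =====

-- A's fold, from an arbitrary start state, in terms of B's closed-form quantities
lemma loopA_eq (l : List (String × Int)) (ip op isum osum run : Int) (cums : List Int) :
    l.foldl stepA (ip, op, isum, osum, run, cums) =
      (ip + ((l.filter (fun p => isIncomingB p.1)).length : Int),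
       op + ((l.length : Int) - ((l.filter (fun p => isIncomingB p.1)).length : Int)),
       isum + ((l.filter (fun p => isIncomingB p.1)).map (fun p => p.2)).sum,
       osum + ((l.map (fun p => p.2)).sum - ((l.filter (fun p => isIncomingB p.1)).map (fun p => p.2)).sum),
       (l.map (fun p => p.2)).foldl stepRun (run, cums)) := by
  induction l generalizing ip op isum osum run cums with
  | nil => simp
  | cons hd tl ih =>
    by_cases h : isIncomingB hd.1 = true
    · have hs : stepA (ip, op, isum, osum, run, cums) hd =
          (ip + 1, op, isum + hd.2, osum, run + hd.2, cums ++ [run + hd.2]) := by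
        simp only [stepA]
        rw [if_pos (by simpa [isIncomingB] using h)]
      simp only [List.foldl_cons, hs, ih, List.filter_cons, h, if_pos, List.map_cons,
        List.length_cons, List.sum_cons, Prod.mk.injEq]
      refine ⟨by push_cast; ring, by push_cast; ring, by ring, by ring, rfl⟩
    · have hs : stepA (ip, op, isum, osum, run, cums) hd =
          (ip, op + 1, isum, osum + hd.2, run + hd.2, cums ++ [run + hd.2]) := by
        simp only [stepA]
        rw [if_neg (by simpa [isIncomingB] using h)]
      simp only [List.foldl_cons, hs, ih, List.filter_cons, h, List.map_cons,
        List.length_cons, List.sum_cons, Bool.false_eq_true, if_false, Prod.mk.injEq]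
      exact ⟨trivial, by push_cast; ring, trivial, by ring, rfl⟩

-- ===== VERDICT (by name: the statement is the Claim_ definition above) =====
theorem compute_stats_and_abs_cumulative_sums_spec : Claim_equal_compute_stats_and_abs_cumulative_sums := by
  intro flow_pairs _
  unfold Spec_compute_stats_and_abs_cumulative_sums
  simp only [compute_stats_and_abs_cumulative_sums, compute_stats_and_abs_cumulative_sums_alt,
    loopA_eq, runningSums, List.length_map]
  refine congrArg₂ _ ?_ rfl
  norm_num
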